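-- pv_equiv track=rewrite | github.com/vet-Q/Biotools | src/nomadic/truthset/stratify.py | get_homopolymer_intervals
-- ===== SOURCE A (Python) =====
-- from collections import namedtuple
--
-- SeqInterval = namedtuple("SeqInterval", ["start", "stop", "label"])
--
-- def get_homopolymer_intervals(seq):
--     """
--     Give a nucleotide sequence `seq`, return
--     intervals (start, stop) with homopolymer length
--     indicated
--
--     """
--
--     # Storage
--     intervals = []
--
--     # Init
--     p = seq[0]
--     start = 0
--     stop = 1
--
--     # Iterate
--     for c in seq[1:]:
--         if c != p:
--             intervals.append(SeqInterval(start=start, stop=stop, label=stop - start))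
--             start = stop
--             p = c
--         stop += 1
--
--     # Terminate
--     intervals.append(SeqInterval(start=start, stop=stop, label=stop - start))
--
--     return intervals
-- ===== SOURCE B (Python) =====
-- from collections import namedtuple
--
-- SeqInterval = namedtuple("SeqInterval", ["start", "stop", "label"])
--
-- def get_homopolymer_intervals(seq):
--     # Staged approach: first compute every cut position (0, each index where the
--     # character changes, and len(seq)), then pair up adjacent cuts into intervals.
--     n = len(seq)
--     cuts = [0] + [i + 1 for i, (x, y) in enumerate(zip(seq, seq[1:])) if x != y] + [n]
--     return [SeqInterval(start=a, stop=b, label=b - a) for a, b in zip(cuts, cuts[1:])]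
-- ===== Notes on version B (the rewrite author's own statement) =====
-- stated objective: alternative
-- what changed: B replaces A's stateful previous-character scan by two staged passes: it first lists all cut positions (0, every index where adjacent characters differ, len(seq)) and then zips adjacent cut positions into the intervals.
import Mathlib
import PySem

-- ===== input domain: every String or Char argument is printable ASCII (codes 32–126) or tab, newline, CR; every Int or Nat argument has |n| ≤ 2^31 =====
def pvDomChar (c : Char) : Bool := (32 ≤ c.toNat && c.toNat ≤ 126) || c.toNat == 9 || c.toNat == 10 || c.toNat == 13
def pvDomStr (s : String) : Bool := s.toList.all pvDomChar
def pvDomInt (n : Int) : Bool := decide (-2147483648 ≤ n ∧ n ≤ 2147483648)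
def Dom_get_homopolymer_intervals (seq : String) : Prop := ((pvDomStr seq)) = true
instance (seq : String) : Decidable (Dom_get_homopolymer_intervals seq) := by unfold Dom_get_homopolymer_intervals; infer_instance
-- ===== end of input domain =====

-- B: replaces A's stateful previous-char scan by two staged passes (collect all cut positions, then pair adjacent cuts); alternative decomposition, not faster. A raises IndexError on "", which Pre_ excludes.


-- ===== PORT A =====
-- A's loop body: state (intervals, p, start, stop)
def pvAStep (st : List (Int × Int × Int) × Char × Int × Int) (c : Char) :
    List (Int × Int × Int) × Char × Int × Int :=
  let (intervals, p, start, stop) := st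
  if c ≠ p then (intervals ++ [(start, stop, stop - start)], c, stop, stop + 1)
  else (intervals, p, start, stop + 1)

def get_homopolymer_intervals (seq : String) : List (Int × Int × Int) :=
  match seq.toList with
  | [] => []   -- unreachable under Pre_ (Python raises IndexError at seq[0])
  | p :: rest =>
    let st := rest.foldl pvAStep ([], p, 0, 1)
    st.1 ++ [(st.2.2.1, st.2.2.2, st.2.2.2 - st.2.2.1)]

-- ===== PORT B =====
-- cuts = [0] + [i+1 for i,(x,y) in enumerate(zip(seq, seq[1:])) if x != y] + [n];
-- intervals = [(a, b, b-a) for a,b in zip(cuts, cuts[1:])]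
def get_homopolymer_intervals_alt (seq : String) : List (Int × Int × Int) :=
  let xs := seq.toList
  let n : Int := (xs.length : Int)
  let cuts : List Int :=
    (0 :: ((PySem.List.enumerate (xs.zip (PySem.List.slice xs (some 1) none)) 0).filter
            (fun q => q.2.1 != q.2.2)).map (fun q => q.1 + 1)) ++ [n]
  (cuts.zip (PySem.List.slice cuts (some 1) none)).map (fun q => (q.1, q.2, q.2 - q.1))

-- ===== PRECONDITION & SPEC =====
-- Pre_ excludes exactly the empty string, on which A raises IndexError.
def Pre_get_homopolymer_intervals (seq : String) : Prop := seq ≠ ""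
instance (seq : String) : Decidable (Pre_get_homopolymer_intervals seq) := by unfold Pre_get_homopolymer_intervals; infer_instance
def pvWitness_get_homopolymer_intervals : String := "AATG"

def Spec_get_homopolymer_intervals (seq : String) (out : List (Int × Int × Int)) : Prop := out = get_homopolymer_intervals_alt seq
instance (seq : String) (out : List (Int × Int × Int)) : Decidable (Spec_get_homopolymer_intervals seq out) := by unfold Spec_get_homopolymer_intervals; infer_instance

-- ===== CLAIM (what is proved, stated in full; the proofs are below) =====
def Claim_equal_get_homopolymer_intervals : Prop := ∀ (seq : String), Dom_get_homopolymer_intervals seq → Pre_get_homopolymer_intervals seq → Spec_get_homopolymer_intervals seq (get_homopolymer_intervals seq)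

-- ===== LEMMAS AND PROOFS =====

-- the consecutive equal-character runs of a list
def pvRunsGo (c : Char) (run : List Char) : List Char → List (List Char)
  | [] => [run.reverse]
  | d :: rest => if d == c then pvRunsGo c (d :: run) rest else run.reverse :: pvRunsGo d [d] rest

def pvRuns : List Char → List (List Char)
  | [] => []
  | c :: rest => pvRunsGo c [c] rest

-- the interval list of a run decomposition, written structurally
def pvBRun (start : Int) : List (List Char) → List (Int × Int × Int)
  | [] => []
  | g :: gs => (start, start + g.length, (g.length : Int)) :: pvBRun (start + g.length) gs

-- the cut positions of a run decomposition (partial sums of run lengths, with s in front)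
def pvCuts (s : Int) : List (List Char) → List Int
  | [] => [s]
  | g :: gs => s :: pvCuts (s + g.length) gs

-- the inner boundary positions (pos = index of the head of the remaining list)
def pvBnd (pos : Int) (p : Char) : List Char → List Int
  | [] => []
  | c :: cs => if c ≠ p then pos :: pvBnd (pos + 1) c cs else pvBnd (pos + 1) c cs

-- A's loop invariant: finishing A's loop over xs yields the run intervals
theorem pvA_loop (xs : List Char) : ∀ (p : Char) (run : List Char) (acc : List (Int × Int × Int)) (start : Int),
    ((xs.foldl pvAStep (acc, p, start, start + (run.length : Int))).1 ++
      [((xs.foldl pvAStep (acc, p, start, start + (run.length : Int))).2.2.1,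
        (xs.foldl pvAStep (acc, p, start, start + (run.length : Int))).2.2.2,
        (xs.foldl pvAStep (acc, p, start, start + (run.length : Int))).2.2.2 -
        (xs.foldl pvAStep (acc, p, start, start + (run.length : Int))).2.2.1)]) =
    acc ++ pvBRun start (pvRunsGo p run xs) := by
  induction xs with
  | nil =>
    intro p run acc start
    simp [pvRunsGo, pvBRun]
  | cons d xs ih =>
    intro p run acc start
    by_cases h : d = p
    · subst h
      have h1 : start + (run.length : Int) + 1 = start + ((d :: run).length : Int) := by
        simp; ring
      simp only [List.foldl_cons, pvAStep, ne_eq, not_true_eq_false, pvRunsGo,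
        beq_self_eq_true, if_true, reduceIte, h1]
      exact ih d (d :: run) acc start
    · have hb : (d == p) = false := by simp [h]
      have h1 : start + (run.length : Int) + 1 = (start + (run.length : Int)) + (([d] : List Char).length : Int) := by
        simp
      simp only [List.foldl_cons, pvAStep, ne_eq, h, not_false_eq_true, if_true, pvRunsGo, hb,
        Bool.false_eq_true, reduceIte, h1]
      rw [ih d [d] (acc ++ [(start, start + (run.length : Int), start + (run.length : Int) - start)]) (start + (run.length : Int))]
      simp [pvBRun]

-- the enumerate/zip/filter/map comprehension of Source B computes the boundary positions
theorem pvE1 (rest : List Char) : ∀ (p : Char) (i : Int),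
    ((PySem.List.enumerate ((p :: rest).zip rest) i).filter
        (fun q => q.2.1 != q.2.2)).map (fun q => q.1 + 1) = pvBnd (i + 1) p rest := by
  induction rest with
  | nil => intro p i; simp [pvBnd]
  | cons c cs ih =>
    intro p i
    by_cases h : c = p
    · subst h
      simp only [List.zip_cons_cons, PySem.List.enumerate_cons, pvBnd, ne_eq,
        not_true_eq_false, reduceIte, List.filter_cons, bne_self_eq_false,
        Bool.false_eq_true]
      exact ih c (i + 1)
    · have hb : (p != c) = true := by simp [Ne.symm h]
      simp only [List.zip_cons_cons, PySem.List.enumerate_cons, pvBnd, ne_eq, h,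
        not_false_eq_true, reduceIte, List.filter_cons, hb, List.map_cons]
      rw [ih c (i + 1)]

-- the cut positions of the runs are: s, the inner boundaries, and the total length
theorem pvB3 (ys : List Char) : ∀ (p : Char) (run : List Char) (s : Int),
    pvCuts s (pvRunsGo p run ys) =
      s :: (pvBnd (s + (run.length : Int)) p ys ++ [s + (run.length : Int) + (ys.length : Int)]) := by
  induction ys with
  | nil => intro p run s; simp [pvRunsGo, pvCuts, pvBnd]
  | cons c cs ih =>
    intro c' run s
    by_cases h : c = c'
    · subst h
      simp only [pvRunsGo, beq_self_eq_true, reduceIte, pvBnd, ne_eq, not_true_eq_false]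
      rw [ih c (c :: run) s]
      simp only [List.length_cons, List.cons.injEq, true_and]
      push_cast
      have e1 : s + ((run.length : Int) + 1) = s + (run.length : Int) + 1 := by ring
      have e2 : s + (run.length : Int) + 1 + (cs.length : Int) =
          s + (run.length : Int) + ((cs.length : Int) + 1) := by ring
      rw [e1, e2]
    · have hb : (c == c') = false := by simp [h]
      simp only [pvRunsGo, hb, Bool.false_eq_true, reduceIte, pvCuts, pvBnd, ne_eq, h,
        not_false_eq_true, reduceIte, List.length_reverse]
      rw [ih c [c] (s + (run.length : Int))]
      simp only [List.length_cons, List.length_nil, List.cons.injEq, true_and]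
      push_cast
      rw [List.cons_append]
      have e2 : s + (run.length : Int) + 1 + (cs.length : Int) =
          s + (run.length : Int) + ((cs.length : Int) + 1) := by ring
      rw [e2]

-- pvCuts always starts with its offset
theorem pvCuts_eq_cons (gs : List (List Char)) (s : Int) :
    pvCuts s gs = s :: (pvCuts s gs).tail := by
  cases gs <;> simp [pvCuts]

-- pairing adjacent cut positions gives the run intervals
theorem pvB2 (gs : List (List Char)) : ∀ (s : Int),
    ((pvCuts s gs).zip (pvCuts s gs).tail).map (fun q => (q.1, q.2, q.2 - q.1)) =
      pvBRun s gs := by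
  induction gs with
  | nil => intro s; simp [pvCuts, pvBRun]
  | cons g gs ih =>
    intro s
    have h := pvCuts_eq_cons gs (s + (g.length : Int))
    simp only [pvCuts, pvBRun]
    rw [h]
    simp only [List.tail_cons, List.zip_cons_cons, List.map_cons]
    rw [← h, ih (s + (g.length : Int))]
    simp

theorem pv_toList_ne (seq : String) (h : seq ≠ "") : seq.toList ≠ [] := by
  intro hc
  exact h (by simpa using congrArg String.ofList hc)

-- ===== VERDICT (by name: the statement is the Claim_ definition above) =====
theorem get_homopolymer_intervals_spec : Claim_equal_get_homopolymer_intervals := by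
  intro seq _ hpre
  unfold Spec_get_homopolymer_intervals get_homopolymer_intervals get_homopolymer_intervals_alt
  cases hs : seq.toList with
  | nil => exact absurd hs (pv_toList_ne seq hpre)
  | cons p rest =>
    simp only [PySem.List.slice_from_one, List.tail_cons]
    rw [pvE1 rest p 0]
    have hcuts : ((0 : Int) :: pvBnd (0 + 1) p rest) ++ [((p :: rest).length : Int)] =
        pvCuts 0 (pvRuns (p :: rest)) := by
      rw [pvRuns, pvB3 rest p [p] 0, List.cons_append]
      simp
      omega
    rw [hcuts, pvB2]
    have := pvA_loop rest p [p] [] 0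
    simp only [List.length_cons, List.length_nil, Nat.cast_one, zero_add] at this
    simpa [pvRuns] using this
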